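-- pv_equiv track=rewrite | github.com/yyytae0/algorithm-training | programmers/2-35.py | solution
-- ===== SOURCE A (Python) =====
-- def solution(cacheSize, cities):
--     if cacheSize == 0:
--         return 5 * len(cities)
--     cache = dict()
--     cnt = 1
--     answer = 0
--     for i in cities:
--         t = i.lower()
--         d = cache.get(t)
--         if d and d >= cnt-cacheSize:
--             answer += 1
--         else:
--             answer += 5
--         cache[t] = cnt
--         cnt += 1
--     return answer
-- ===== SOURCE B (Python) =====
-- def solution(cacheSize, cities):
--     lowered = [c.lower() for c in cities]
--     total = 0
--     for j, t in enumerate(lowered):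
--         total += 1 if t in lowered[max(j - cacheSize, 0):j] else 5
--     return total
-- ===== Notes on version B (the rewrite author's own statement) =====
-- stated objective: simpler
-- what changed: Replaces the timestamp dictionary, the running counter and the cacheSize==0 special case with a single pass that tests each lowercased city for membership in the sliding window lowered[max(j-cacheSize,0):j].
import Mathlib
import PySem

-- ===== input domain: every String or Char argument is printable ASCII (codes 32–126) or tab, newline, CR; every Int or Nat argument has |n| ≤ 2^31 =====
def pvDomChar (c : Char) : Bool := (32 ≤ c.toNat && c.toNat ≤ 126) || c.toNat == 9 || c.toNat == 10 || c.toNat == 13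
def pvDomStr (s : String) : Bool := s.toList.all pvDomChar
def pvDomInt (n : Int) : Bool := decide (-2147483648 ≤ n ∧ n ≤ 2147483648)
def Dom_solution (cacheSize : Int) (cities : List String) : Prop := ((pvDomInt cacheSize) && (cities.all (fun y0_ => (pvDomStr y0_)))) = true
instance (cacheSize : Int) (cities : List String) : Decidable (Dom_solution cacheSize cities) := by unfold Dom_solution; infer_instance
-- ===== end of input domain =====

-- B replaces A's timestamp dict + counter with a per-index sliding-window slice membership test (simpler, no cacheSize==0 special case); not faster.

-- ===== PORT A =====
def solution (cacheSize : Int) (cities : List String) : Int :=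
  if cacheSize = 0 then 5 * (cities.length : Int)
  else
    (cities.foldl
      (fun (st : PySem.Dict String Int × Int × Int) (i : String) =>
        let t := PySem.Str.lower i
        let d := st.1.get? t
        let answer :=
          match d with
          | some dv => if dv ≠ 0 ∧ dv ≥ st.2.1 - cacheSize then st.2.2 + 1 else st.2.2 + 5
          | none => st.2.2 + 5
        (st.1.insert t st.2.1, st.2.1 + 1, answer))
      (PySem.Dict.empty, 1, 0)).2.2

-- ===== PORT B =====
def solution_alt (cacheSize : Int) (cities : List String) : Int :=
  let lowered := cities.map PySem.Str.lower
  (PySem.List.enumerate lowered).foldl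
    (fun total jt =>
      total + (if jt.2 ∈ PySem.List.slice lowered (some (max (jt.1 - cacheSize) 0)) (some jt.1) then 1 else 5))
    0

-- ===== PRECONDITION & SPEC =====
def Spec_solution (cacheSize : Int) (cities : List String) (out : Int) : Prop := out = solution_alt cacheSize cities
instance (cacheSize : Int) (cities : List String) (out : Int) : Decidable (Spec_solution cacheSize cities out) := by unfold Spec_solution; infer_instance

-- ===== CLAIM (what is proved, stated in full; the proofs are below) =====
def Claim_equal_solution : Prop := ∀ (cacheSize : Int) (cities : List String), Dom_solution cacheSize cities → Spec_solution cacheSize cities (solution cacheSize cities)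

-- ===== LEMMAS AND PROOFS =====

-- A's loop body, on the already-lowered element.
def gA (c : Int) (st : PySem.Dict String Int × Int × Int) (t : String) : PySem.Dict String Int × Int × Int :=
  let d := st.1.get? t
  let answer :=
    match d with
    | some dv => if dv ≠ 0 ∧ dv ≥ st.2.1 - c then st.2.2 + 1 else st.2.2 + 5
    | none => st.2.2 + 5
  (st.1.insert t st.2.1, st.2.1 + 1, answer)

-- B's loop body over a fixed lowered list.
def stepB (c : Int) (L : List String) (total : Int) (jt : Int × String) : Int :=
  total + (if jt.2 ∈ PySem.List.slice L (some (max (jt.1 - c) 0)) (some jt.1) then 1 else 5)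

-- index of the LAST occurrence of t in xs
def lastIdx (t : String) : List String → Option Nat
  | [] => none
  | x :: xs =>
    match lastIdx t xs with
    | some p => some (p + 1)
    | none => if x = t then some 0 else none

theorem foldA_eq (c : Int) (cities : List String) :
    ∀ st, cities.foldl
      (fun (st : PySem.Dict String Int × Int × Int) (i : String) =>
        let t := PySem.Str.lower i
        let d := st.1.get? t
        let answer :=
          match d with
          | some dv => if dv ≠ 0 ∧ dv ≥ st.2.1 - c then st.2.2 + 1 else st.2.2 + 5
          | none => st.2.2 + 5
        (st.1.insert t st.2.1, st.2.1 + 1, answer)) st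
    = (cities.map PySem.Str.lower).foldl (gA c) st := by
  induction cities with
  | nil => intro st; rfl
  | cons x xs ih => intro st; simp only [List.foldl_cons, List.map_cons]; exact ih _

theorem mem_drop_iff_lastIdx (t : String) :
    ∀ (xs : List String) (a : Nat), t ∈ xs.drop a ↔ ∃ p, lastIdx t xs = some p ∧ a ≤ p := by
  intro xs
  induction xs with
  | nil => intro a; simp [lastIdx]
  | cons x xs ih =>
    intro a
    cases a with
    | zero =>
      rcases h : lastIdx t xs with _ | p
      · have hnm : t ∉ xs := by
          intro hm
          rcases (ih 0).mp (by simpa using hm) with ⟨p, hp, -⟩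
          rw [h] at hp; cases hp
        simp only [List.drop_zero, List.mem_cons, lastIdx, h]
        by_cases hx : x = t
        · subst hx; simp
        · simp [hx, hnm, Ne.symm hx]
      · have hmem : t ∈ xs := by
          have := (ih 0).mpr ⟨p, h, Nat.zero_le _⟩
          simpa using this
        simp only [List.drop_zero, List.mem_cons, lastIdx, h]
        simp [hmem]
    | succ a =>
      have hd : (x :: xs).drop (a + 1) = xs.drop a := rfl
      rw [hd, ih a]
      constructor
      · rintro ⟨p, hp, hle⟩
        exact ⟨p + 1, by simp [lastIdx, hp], by omega⟩
      · rintro ⟨q, hq, hle⟩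
        rcases h : lastIdx t xs with _ | p
        · simp only [lastIdx, h] at hq
          split at hq
          · cases hq; omega
          · cases hq
        · simp only [lastIdx, h] at hq
          cases hq
          exact ⟨p, rfl, by omega⟩

theorem lastIdx_append_singleton (t x : String) :
    ∀ pre, lastIdx t (pre ++ [x]) = if x = t then some pre.length else lastIdx t pre := by
  intro pre
  induction pre with
  | nil => simp [lastIdx]
  | cons y pre ih =>
    simp only [List.cons_append, lastIdx, ih]
    split_ifs <;> rfl

theorem slice_window (pre rest : List String) (c : Int) :
    PySem.List.slice (pre ++ rest) (some (max ((pre.length : Int) - c) 0)) (some (pre.length : Int))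
      = pre.drop (((pre.length : Int) - c).toNat) := by
  rw [PySem.List.slice_toNat (pre ++ rest) (le_max_right _ _) (Int.natCast_nonneg _)]
  have hmax : (max ((pre.length : Int) - c) 0).toNat = ((pre.length : Int) - c).toNat := by omega
  have hj : ((pre.length : Int)).toNat = pre.length := by omega
  rw [hmax, hj]
  set aN := ((pre.length : Int) - c).toNat with haN
  by_cases h : aN ≤ pre.length
  · rw [List.drop_append_of_le_length h]
    have hlen : (pre.drop aN).length = pre.length - aN := by simp
    rw [List.take_append_of_le_length (by omega), List.take_of_length_le (by omega)]
  · have h1 : pre.length - aN = 0 := by omega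
    rw [h1]
    simp [List.drop_eq_nil_of_le (by omega : pre.length ≤ aN)]

theorem loopA_eq (c : Int) :
    ∀ (xs pre : List String) (cache : PySem.Dict String Int) (ans : Int),
      (∀ t, cache.get? t = (lastIdx t pre).map (fun p => (p : Int) + 1)) →
      (xs.foldl (gA c) (cache, (pre.length : Int) + 1, ans)).2.2
        = (PySem.List.enumerate xs ((pre.length : Int))).foldl (stepB c (pre ++ xs)) ans := by
  intro xs
  induction xs with
  | nil => intro pre cache ans _; simp [PySem.List.enumerate]
  | cons x xs ih =>
    intro pre cache ans hcache
    rw [PySem.List.enumerate_cons, List.foldl_cons, List.foldl_cons]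
    have hsl : PySem.List.slice (pre ++ x :: xs) (some (max ((pre.length : Int) - c) 0)) (some (pre.length : Int))
        = pre.drop (((pre.length : Int) - c).toNat) := slice_window pre (x :: xs) c
    -- step values agree
    have hans : (gA c (cache, (pre.length : Int) + 1, ans) x).2.2
        = stepB c (pre ++ x :: xs) ans ((pre.length : Int), x) := by
      unfold gA stepB
      rw [hcache x]
      rcases hl : lastIdx x pre with _ | p
      · have hnm : x ∉ pre.drop (((pre.length : Int) - c).toNat) := by
          rw [mem_drop_iff_lastIdx]
          rintro ⟨q, hq, -⟩; rw [hl] at hq; cases hq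
        simp [hsl, hnm]
      · have hmem : x ∈ pre.drop (((pre.length : Int) - c).toNat)
            ↔ (((pre.length : Int) - c).toNat ≤ p) := by
          rw [mem_drop_iff_lastIdx]
          constructor
          · rintro ⟨q, hq, hle⟩; rw [hl] at hq; cases hq; exact hle
          · intro h; exact ⟨p, hl, h⟩
        have hiff : ((p : Int) + 1 ≠ 0 ∧ (p : Int) + 1 ≥ (pre.length : Int) + 1 - c)
            ↔ x ∈ pre.drop (((pre.length : Int) - c).toNat) := by
          rw [hmem]; omega
        by_cases hA : (p : Int) + 1 ≠ 0 ∧ (p : Int) + 1 ≥ (pre.length : Int) + 1 - c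
        · simp [hsl, hA, hiff.mp hA]
        · have hB : x ∉ pre.drop (((pre.length : Int) - c).toNat) := fun hm => hA (hiff.mpr hm)
          simp [hsl, hB]
          omega
    have hstate : gA c (cache, (pre.length : Int) + 1, ans) x
        = (cache.insert x ((pre.length : Int) + 1), ((pre ++ [x]).length : Int) + 1,
            (gA c (cache, (pre.length : Int) + 1, ans) x).2.2) := by
      conv_lhs => unfold gA
      refine Prod.ext rfl (Prod.ext ?_ rfl)
      simp
    have hcache' : ∀ t, (cache.insert x ((pre.length : Int) + 1)).get? t
        = (lastIdx t (pre ++ [x])).map (fun p => (p : Int) + 1) := by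
      intro t
      rw [PySem.Dict.get?_insert, lastIdx_append_singleton]
      by_cases h : t = x
      · subst h; simp
      · rw [if_neg h, if_neg (fun hh => h hh.symm), hcache t]
    rw [hstate, ih (pre ++ [x]) _ _ hcache', hans]
    have hL : (pre ++ [x]) ++ xs = pre ++ x :: xs := by simp
    have hlen : ((pre ++ [x]).length : Int) = (pre.length : Int) + 1 := by simp
    rw [hL, hlen]

theorem alt_zero (L : List String) :
    ∀ (xs : List String) (s ans : Int), 0 ≤ s →
      (PySem.List.enumerate xs s).foldl (stepB 0 L) ans = ans + 5 * (xs.length : Int) := by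
  intro xs
  induction xs with
  | nil => intro s ans _; simp [PySem.List.enumerate]
  | cons x xs ih =>
    intro s ans hs
    rw [PySem.List.enumerate_cons, List.foldl_cons]
    have hstep : stepB 0 L ans (s, x) = ans + 5 := by
      show ans + (if x ∈ PySem.List.slice L (some (max (s - 0) 0)) (some s) then 1 else 5) = ans + 5
      have hmax : max (s - 0) 0 = s := by omega
      rw [hmax, PySem.List.slice_toNat L hs hs]
      simp
    rw [hstep, ih (s + 1) (ans + 5) (by omega)]
    push_cast [List.length_cons]
    ring

-- ===== VERDICT (by name: the statement is the Claim_ definition above) =====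
theorem solution_spec : Claim_equal_solution := by
  intro c cities _
  unfold Spec_solution
  by_cases hc : c = 0
  · subst hc
    unfold solution solution_alt
    rw [if_pos rfl]
    show 5 * (cities.length : Int)
      = (PySem.List.enumerate (cities.map PySem.Str.lower) 0).foldl
          (stepB 0 (cities.map PySem.Str.lower)) 0
    rw [alt_zero (cities.map PySem.Str.lower) (cities.map PySem.Str.lower) 0 0 (le_refl 0)]
    simp
  · unfold solution solution_alt
    rw [if_neg hc]
    rw [foldA_eq]
    have hcache : ∀ t, (PySem.Dict.empty : PySem.Dict String Int).get? t
        = (lastIdx t ([] : List String)).map (fun p => (p : Int) + 1) := by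
      intro t; simp [lastIdx, PySem.Dict.get?_empty]
    have := loopA_eq c (cities.map PySem.Str.lower) [] PySem.Dict.empty 0 hcache
    simp only [List.length_nil, Int.natCast_zero, zero_add, List.nil_append] at this
    rw [this]
    rfl
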